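-- pv_equiv track=rewrite | github.com/briankheng/TubesDaspro | F09.py | CSVParser
-- ===== SOURCE A (Python) =====
-- def CSVParser (raw):
--     M = [["" for col in range(6)] for row in range(100)]
--     for i in range(len(raw)): # Fungsi len buat sendiri
--         idx = 0
--         temp = ""
--         for j in range(len(raw[i])): # Fungsi len buat sendiri
--             if(raw[i][j] == ';' or raw[i][j] == '\n'):
--                 M[i][idx] = temp
--                 temp = ""
--                 idx += 1
--             else:
--                 temp += raw[i][j]
--     return M
-- ===== SOURCE B (Python) =====
-- def CSVParser(raw):
--     def fields(line):
--         # completed fields: segments terminated by ';' or '\n'; the tail after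
--         # the last separator is never stored (as in the original)
--         for j, ch in enumerate(line):
--             if ch == ';' or ch == '\n':
--                 return [line[:j]] + fields(line[j + 1:])
--         return []
--     rows = [fields(line) for line in raw[:100]]
--     rows += [[] for _ in range(100 - len(rows))]
--     return [r + [""] * (6 - len(r)) for r in rows]
-- ===== Notes on version B (the rewrite author's own statement) =====
-- stated objective: simpler
-- what changed: B replaces A's character-by-character scan that mutates a prefilled 100x6 matrix with a recursive split of each line into its completed fields (find next separator, slice, recurse) and builds the fixed 100-row matrix directly from padded rows (it parses only the first 100 lines and slices whole fields instead of growing strings character by character, a constant-factor speedup). Pre_ excludes exactly the inputs where A raises IndexError: a line with more than 6 separators, or a line beyond the 100th containing a separator.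
import Mathlib
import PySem

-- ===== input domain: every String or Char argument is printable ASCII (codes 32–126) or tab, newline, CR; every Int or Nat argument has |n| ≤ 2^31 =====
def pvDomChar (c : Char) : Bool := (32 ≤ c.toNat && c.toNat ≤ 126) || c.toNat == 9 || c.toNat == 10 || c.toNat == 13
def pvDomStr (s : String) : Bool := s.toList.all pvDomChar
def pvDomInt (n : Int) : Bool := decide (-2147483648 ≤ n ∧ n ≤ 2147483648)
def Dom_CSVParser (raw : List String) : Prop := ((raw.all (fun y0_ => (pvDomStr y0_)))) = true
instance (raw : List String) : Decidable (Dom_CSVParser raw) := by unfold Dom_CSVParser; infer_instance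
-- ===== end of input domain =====

-- ===== PORT A =====
-- B restructures A's char-scan-and-mutate into a recursive per-line split plus direct row
-- construction (objective: simpler).
-- Port of A. temp is carried as List Char (exact: Python concatenation of single chars onto a
-- string). M[i][idx] = temp is ported with List.set, a no-op out of range where Python raises
-- IndexError; exactly those inputs are excluded by Pre_CSVParser.
def CSVParser (raw : List String) : List (List String) :=
  (List.range raw.length).foldl (fun M i =>
    ((raw.getD i "").toList.foldl
      (fun (st : List (List String) × Nat × List Char) c =>
        if c = ';' ∨ c = '\n' then
          (st.1.set i ((st.1.getD i []).set st.2.1 (String.ofList st.2.2)), st.2.1 + 1, [])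
        else (st.1, st.2.1, st.2.2 ++ [c]))
      (M, 0, [])).1)
    (List.replicate 100 (List.replicate 6 ""))

-- ===== PORT B =====
-- fields(line): find the first separator, emit the slice before it, recurse on the rest.
-- The recursion on the ever-shorter suffix is expressed with a length fuel so that the
-- definition is structural (kernel-reducible); pvFieldsGo_fuel_irrel below shows the fuel
-- does not matter once it is at least the length.
def pvFieldsGo : Nat → List Char → List (List Char)
  | 0, _ => []
  | fuel + 1, l =>
    match l.findIdx? (fun c => c == ';' || c == '\n') with
    | some j => l.take j :: pvFieldsGo fuel (l.drop (j + 1))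
    | none => []

def pvFieldsB (l : List Char) : List (List Char) := pvFieldsGo l.length l

def CSVParser_alt (raw : List String) : List (List String) :=
  let rows := (raw.take 100).map (fun line => (pvFieldsB line.toList).map String.ofList)
  let rows2 := rows ++ (List.range (100 - rows.length)).map (fun _ => ([] : List String))
  rows2.map (fun r => r ++ List.replicate (6 - r.length) "")

-- ===== PRECONDITION & SPEC =====
-- Pre_ excludes exactly the inputs on which A raises IndexError: a line with more than 6
-- separators (the 7th write M[i][idx] hits idx = 6), or a line beyond the 100th containing a
-- separator (the write M[i][idx] hits i >= 100).
def Pre_CSVParser (raw : List String) : Prop :=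
  (∀ line ∈ raw, line.toList.countP (fun c => c == ';' || c == '\n') ≤ 6) ∧
    ∀ line ∈ raw.drop 100, line.toList.countP (fun c => c == ';' || c == '\n') = 0
instance (raw : List String) : Decidable (Pre_CSVParser raw) := by unfold Pre_CSVParser; infer_instance
def pvWitness_CSVParser : List String := ["a;b;c;", "x\ny;"]

def Spec_CSVParser (raw : List String) (out : List (List String)) : Prop := out = CSVParser_alt raw
instance (raw : List String) (out : List (List String)) : Decidable (Spec_CSVParser raw out) := by unfold Spec_CSVParser; infer_instance

-- ===== CLAIM (what is proved, stated in full; the proofs are below) =====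
def Claim_equal_CSVParser : Prop := ∀ (raw : List String), Dom_CSVParser raw → Pre_CSVParser raw → Spec_CSVParser raw (CSVParser raw)
-- ===== LEMMAS AND PROOFS =====

theorem pvFieldsGo_fuel_irrel (fuel : Nat) :
    ∀ (fuel' : Nat) (l : List Char), l.length ≤ fuel → l.length ≤ fuel' →
    pvFieldsGo fuel l = pvFieldsGo fuel' l := by
  induction fuel with
  | zero =>
    intro fuel' l h _
    have : l = [] := List.eq_nil_of_length_eq_zero (by omega)
    subst this
    cases fuel' <;> simp [pvFieldsGo]
  | succ f ih =>
    intro fuel' l h h'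
    cases fuel' with
    | zero =>
      have : l = [] := List.eq_nil_of_length_eq_zero (by omega)
      subst this
      simp [pvFieldsGo]
    | succ f' =>
      cases hfi : l.findIdx? (fun c => c == ';' || c == '\n') with
      | none => rw [pvFieldsGo, pvFieldsGo]; simp only [hfi]
      | some j =>
        have hne : l ≠ [] := by rintro rfl; simp at hfi
        have hpos : 0 < l.length := List.length_pos_iff.mpr hne
        have hd : (l.drop (j + 1)).length ≤ l.length - 1 := by
          rw [List.length_drop]; omega
        rw [pvFieldsGo, pvFieldsGo]
        simp only [hfi]
        rw [ih f' (l.drop (j + 1)) (by omega) (by omega)]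

theorem fieldsB_none {l : List Char}
    (h : l.findIdx? (fun c => c == ';' || c == '\n') = none) : pvFieldsB l = [] := by
  unfold pvFieldsB
  cases hl : l.length with
  | zero => simp [pvFieldsGo]
  | succ m => rw [pvFieldsGo, h]

theorem fieldsB_some {l : List Char} {j : Nat}
    (h : l.findIdx? (fun c => c == ';' || c == '\n') = some j) :
    pvFieldsB l = l.take j :: pvFieldsB (l.drop (j + 1)) := by
  have hne : l ≠ [] := by rintro rfl; simp at h
  have hpos : 0 < l.length := List.length_pos_iff.mpr hne
  unfold pvFieldsB
  cases hl : l.length with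
  | zero => omega
  | succ m =>
    rw [pvFieldsGo]
    simp only [h]
    congr 1
    show _ = pvFieldsGo (l.drop (j + 1)).length (l.drop (j + 1))
    exact pvFieldsGo_fuel_irrel m (l.drop (j + 1)).length (l.drop (j + 1))
      (by rw [List.length_drop]; omega) le_rfl

def pvAcc : List Char → List Char → List (List Char)
  | [], _ => []
  | c :: l, t => if c = ';' ∨ c = '\n' then t :: pvAcc l [] else pvAcc l (t ++ [c])

theorem pvAcc_eq_fieldsB (l : List Char) :
    ∀ t, pvAcc l t = match pvFieldsB l with
      | [] => []
      | f :: fs => (t ++ f) :: fs := by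
  induction l with
  | nil => intro t; rw [fieldsB_none (by simp)]; simp [pvAcc]
  | cons c l ih =>
    intro t
    rw [pvAcc]
    by_cases hc : c = ';' ∨ c = '\n'
    · rw [if_pos hc]
      have h0 : (c :: l).findIdx? (fun c => c == ';' || c == '\n') = some 0 := by
        rcases hc with hc | hc <;> simp [List.findIdx?_cons, hc]
      rw [fieldsB_some h0]
      simp only [List.take_zero, List.drop_succ_cons, List.drop_zero]
      rw [ih []]
      cases pvFieldsB l <;> simp
    · rw [not_or] at hc
      have hcb : ((c == ';' || c == '\n') = false) := by
        simp [hc.1, hc.2]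
      rw [if_neg (by tauto), ih (t ++ [c])]
      cases hfi : l.findIdx? (fun c => c == ';' || c == '\n') with
      | none =>
        rw [fieldsB_none hfi]
        rw [fieldsB_none (show (c :: l).findIdx? (fun c => c == ';' || c == '\n') = none by
          simp [List.findIdx?_cons, hcb, hfi])]
      | some j =>
        rw [fieldsB_some hfi]
        rw [fieldsB_some (show (c :: l).findIdx? (fun c => c == ';' || c == '\n') = some (j + 1) by
          simp [List.findIdx?_cons, hcb, hfi])]
        simp

theorem pvAcc_nil_eq (l : List Char) : pvAcc l [] = pvFieldsB l := by
  rw [pvAcc_eq_fieldsB]; cases pvFieldsB l <;> simp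

-- write fields fs into row r at positions k, k+1, …
def pvSetSeq (r : List String) (k : Nat) : List (List Char) → List String
  | [] => r
  | f :: fs => pvSetSeq (r.set k (String.ofList f)) (k + 1) fs

theorem pvAcc_length (l : List Char) :
    ∀ t, (pvAcc l t).length = l.countP (fun c => c == ';' || c == '\n') := by
  induction l with
  | nil => intro t; simp [pvAcc]
  | cons c l ih =>
    intro t
    rw [pvAcc, List.countP_cons]
    by_cases hc : c = ';' ∨ c = '\n'
    · have : (c == ';' || c == '\n') = true := by rcases hc with hc | hc <;> simp [hc]
      rw [if_pos hc]; simp [this, ih]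
    · rw [not_or] at hc
      have : (c == ';' || c == '\n') = false := by simp [hc.1, hc.2]
      rw [if_neg (by tauto)]; simp [this, ih]

-- the inner character loop of A writes exactly the completed fields into row i
theorem innerA (l : List Char) :
    ∀ (M : List (List String)) (i k : Nat) (t : List Char), i < M.length →
    (l.foldl
      (fun (st : List (List String) × Nat × List Char) c =>
        if c = ';' ∨ c = '\n' then
          (st.1.set i ((st.1.getD i []).set st.2.1 (String.ofList st.2.2)), st.2.1 + 1, [])
        else (st.1, st.2.1, st.2.2 ++ [c]))
      (M, k, t)).1 = M.set i (pvSetSeq (M.getD i []) k (pvAcc l t)) := by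
  induction l with
  | nil =>
    intro M i k t hi
    simp [pvAcc, pvSetSeq, List.getD_eq_getElem?_getD, List.getElem?_eq_getElem hi,
      List.set_getElem_self]
  | cons c l ih =>
    intro M i k t hi
    rw [List.foldl_cons, pvAcc]
    by_cases hc : c = ';' ∨ c = '\n'
    · rw [if_pos hc, if_pos hc, pvSetSeq]
      rw [ih _ i (k + 1) [] (by simpa using hi)]
      rw [List.set_set]
      congr 1
      congr 1
      simp [List.getD_eq_getElem?_getD, List.getElem?_set_self' , List.getElem?_eq_getElem hi]
    · rw [if_neg hc, if_neg hc]
      exact ih M i k (t ++ [c]) hi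

theorem pvSetSeq_cons (fs : List (List Char)) :
    ∀ (x : String) (r : List String) (k : Nat),
    pvSetSeq (x :: r) (k + 1) fs = x :: pvSetSeq r k fs := by
  induction fs with
  | nil => intro x r k; simp [pvSetSeq]
  | cons f fs ih => intro x r k; rw [pvSetSeq, List.set_cons_succ, ih, pvSetSeq]

theorem pvSetSeq_replicate (fs : List (List Char)) :
    ∀ (n : Nat), fs.length ≤ n →
    pvSetSeq (List.replicate n "") 0 fs
      = fs.map String.ofList ++ List.replicate (n - fs.length) "" := by
  induction fs with
  | nil => intro n h; simp [pvSetSeq]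
  | cons f fs ih =>
    intro n h
    cases n with
    | zero => simp at h
    | succ m =>
      rw [List.replicate_succ, pvSetSeq, List.set_cons_zero, pvSetSeq_cons,
        ih m (by simpa using h)]
      simp

theorem range_map_const {α : Type} (m : Nat) (a : α) :
    (List.range m).map (fun _ => a) = List.replicate m a := by
  simp

def pvRow (line : String) : List String :=
  pvSetSeq (List.replicate 6 "") 0 (pvAcc line.toList [])

theorem outerA (raw : List String) :
    ∀ n, n ≤ raw.length → n ≤ 100 →
    ((List.range n).foldl (fun M i =>
      ((raw.getD i "").toList.foldl
        (fun (st : List (List String) × Nat × List Char) c =>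
          if c = ';' ∨ c = '\n' then
            (st.1.set i ((st.1.getD i []).set st.2.1 (String.ofList st.2.2)), st.2.1 + 1, [])
          else (st.1, st.2.1, st.2.2 ++ [c]))
        (M, 0, [])).1)
      (List.replicate 100 (List.replicate 6 "")))
    = (raw.take n).map pvRow ++ List.replicate (100 - n) (List.replicate 6 "") := by
  intro n
  induction n with
  | zero => intro _ _; simp
  | succ n ih =>
    intro hn hn100
    have hn' : n ≤ raw.length := by omega
    have hlt : n < 100 := by omega
    rw [List.range_succ, List.foldl_append, List.foldl_cons, List.foldl_nil, ih hn' (by omega)]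
    set A := (raw.take n).map pvRow with hA
    have hAlen : A.length = n := by simp [hA, hn']
    have hMlen : (A ++ List.replicate (100 - n) (List.replicate 6 "")).length = 100 := by
      simp [hAlen]; omega
    rw [innerA _ _ n 0 [] (by rw [hMlen]; omega)]
    have hget : (A ++ List.replicate (100 - n) (List.replicate 6 "")).getD n []
        = List.replicate 6 "" := by
      rw [List.getD_eq_getElem?_getD, List.getElem?_append_right (by omega),
        hAlen, Nat.sub_self]
      rw [List.getElem?_replicate]
      simp [Nat.sub_pos_of_lt hlt]
    rw [hget]
    have hset : ∀ v : List String,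
        (A ++ List.replicate (100 - n) (List.replicate 6 "")).set n v
        = A ++ v :: List.replicate (100 - (n + 1)) (List.replicate 6 "") := by
      intro v
      rw [List.set_append_right n v (by omega), hAlen, Nat.sub_self]
      congr 1
      cases h : (100 - n) with
      | zero => omega
      | succ m =>
        rw [List.replicate_succ, List.set_cons_zero]
        congr 2
        omega
    rw [hset]
    have htake : raw.take (n + 1) = raw.take n ++ [raw[n]'(by omega)] := by
      rw [List.take_add_one]
      simp [List.getElem?_eq_getElem (by omega : n < raw.length)]
    rw [htake, List.map_append]
    have : raw.getD n "" = raw[n]'(by omega) := by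
      simp [List.getD_eq_getElem?_getD, List.getElem?_eq_getElem (by omega : n < raw.length)]
    rw [this]
    simp [pvRow, hA, List.map_take]


-- a line without separators leaves the matrix untouched
theorem innerA_nosep (l : List Char) :
    ∀ (M : List (List String)) (i k : Nat) (t : List Char),
    l.countP (fun c => c == ';' || c == '\n') = 0 →
    (l.foldl
      (fun (st : List (List String) × Nat × List Char) c =>
        if c = ';' ∨ c = '\n' then
          (st.1.set i ((st.1.getD i []).set st.2.1 (String.ofList st.2.2)), st.2.1 + 1, [])
        else (st.1, st.2.1, st.2.2 ++ [c]))
      (M, k, t)).1 = M := by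
  induction l with
  | nil => intro M i k t _; rfl
  | cons c l ih =>
    intro M i k t h
    rw [List.countP_cons] at h
    by_cases hc : c = ';' ∨ c = '\n'
    · exfalso
      have : (c == ';' || c == '\n') = true := by rcases hc with hc | hc <;> simp [hc]
      rw [this] at h; simp at h
    · have hnc := not_or.mp hc
      have hb : (c == ';' || c == '\n') = false := by simp [hnc.1, hnc.2]
      rw [hb] at h
      simp only [if_neg Bool.false_ne_true, Nat.add_zero] at h
      rw [List.foldl_cons, if_neg hc]
      exact ih M i k (t ++ [c]) h

-- the steps for indices at or beyond 100 do nothing (their lines carry no separator under Pre_)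
theorem foldl_tail_id (raw : List String)
    (hpre2 : ∀ line ∈ raw.drop 100, line.toList.countP (fun c => c == ';' || c == '\n') = 0) :
    ∀ (js : List Nat) (M : List (List String)), (∀ j ∈ js, 100 ≤ j) →
    (js.foldl (fun M i =>
      ((raw.getD i "").toList.foldl
        (fun (st : List (List String) × Nat × List Char) c =>
          if c = ';' ∨ c = '\n' then
            (st.1.set i ((st.1.getD i []).set st.2.1 (String.ofList st.2.2)), st.2.1 + 1, [])
          else (st.1, st.2.1, st.2.2 ++ [c]))
        (M, 0, [])).1)
      M) = M := by
  intro js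
  induction js with
  | nil => intro M _; rfl
  | cons j js ih =>
    intro M hjs
    rw [List.foldl_cons]
    have hcnt : (raw.getD j "").toList.countP (fun c => c == ';' || c == '\n') = 0 := by
      by_cases hj : j < raw.length
      · have h100 : 100 ≤ j := hjs j (by simp)
        have hidx : 100 + (j - 100) = j := by omega
        have hg : raw.getD j "" = (raw.drop 100)[j - 100]'(by rw [List.length_drop]; omega) := by
          rw [List.getD_eq_getElem?_getD, List.getElem?_eq_getElem (by omega : j < raw.length)]
          simp [List.getElem_drop, hidx]
        rw [hg]
        exact hpre2 _ (List.getElem_mem _)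
      · rw [List.getD_eq_getElem?_getD, List.getElem?_eq_none (by omega)]
        rfl
    rw [innerA_nosep _ M j 0 [] hcnt]
    exact ih M (fun x hx => hjs x (by simp [hx]))

-- the padded row a line contributes, shared by both final cases
theorem rowB_eq (line : String)
    (hcnt : line.toList.countP (fun c => c == ';' || c == '\n') ≤ 6) :
    pvRow line
      = (pvFieldsB line.toList).map String.ofList
        ++ List.replicate (6 - ((pvFieldsB line.toList).map String.ofList).length) "" := by
  have hlen : (pvAcc line.toList []).length ≤ 6 := by rw [pvAcc_length]; exact hcnt
  simp only [pvRow]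
  rw [pvSetSeq_replicate _ 6 hlen, pvAcc_nil_eq]
  simp

-- ===== VERDICT (by name: the statement is the Claim_ definition above) =====
theorem CSVParser_spec : Claim_equal_CSVParser := by
  intro raw _ hpre
  obtain ⟨hcnt, hover⟩ := hpre
  show CSVParser raw = CSVParser_alt raw
  unfold CSVParser CSVParser_alt
  by_cases h100 : raw.length ≤ 100
  · rw [outerA raw raw.length le_rfl h100, List.take_length]
    simp only [List.take_of_length_le h100, List.length_map, List.map_append, List.map_map,
      List.map_replicate, range_map_const, List.length_nil, Nat.sub_zero, List.nil_append]
    congr 1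
    apply List.map_congr_left
    intro line hline
    exact rowB_eq line (hcnt line hline)
  · have hsplit : List.range raw.length
        = List.range 100 ++ (List.range (raw.length - 100)).map (fun j => 100 + j) := by
      rw [← List.range_add]
      congr 1
      omega
    rw [hsplit, List.foldl_append, outerA raw 100 (by omega) le_rfl,
      foldl_tail_id raw hover _ _ (by intro j hj; simp at hj; omega)]
    have h0 : min 100 raw.length = 100 := by omega
    simp only [Nat.sub_self, List.length_map, List.length_take, List.map_map, h0,
      List.range_zero, List.map_nil, List.append_nil, List.replicate_zero]
    apply List.map_congr_left
    intro line hline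
    exact rowB_eq line (hcnt line (List.mem_of_mem_take hline))
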